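-- pv_equiv track=rewrite | github.com/Laiser399/09s-Py-Data-MultidimensionalInterpolation | lib_multidim.py | iterate_i
-- ===== SOURCE A (Python) =====
-- def iterate_i(l: tuple):
--     def iterate_i_k(l_k: int):
--         if l_k == 0:
--             yield 0
--             yield 1
--         else:
--             for p in range(1, 2 ** (l_k - 1) + 1):
--                 yield 2 * p - 1
--
--     def recursion(state: list, k: int = 0):
--         if k >= len(state):
--             yield tuple(state)
--             return
--         for i_k in iterate_i_k(l[k]):
--             state[k] = i_k
--             for val in recursion(state, k + 1):
--                 yield val
--
--     state = [None] * len(l)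
--     return recursion(state)
-- ===== SOURCE B (Python) =====
-- def iterate_i(l: tuple):
--     # Odometer: precompute each dimension's index sequence and its length, then
--     # enumerate the Cartesian product with an index vector incremented
--     # last-position-first with carry.
--     def gen():
--         seqs = [[0, 1] if lk == 0 else range(1, 2 ** lk, 2) for lk in l]
--         lens = [2 if lk == 0 else 2 ** (lk - 1) for lk in l]
--         n = len(seqs)
--         idx = [0] * n
--         cur = [s[0] for s in seqs]
--         while True:
--             yield tuple(cur)
--             k = n - 1
--             while k >= 0 and idx[k] + 1 == lens[k]:
--                 idx[k] = 0
--                 cur[k] = seqs[k][0]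
--                 k -= 1
--             if k < 0:
--                 return
--             idx[k] += 1
--             cur[k] = seqs[k][idx[k]]
--     return gen()
-- ===== Notes on version B (the rewrite author's own statement) =====
-- stated objective: alternative
-- what changed: Replaces A's nested lazy recursion (one generator level per dimension mutating a shared state list, re-entered for every tuple) by an iterative odometer: precomputed per-dimension sequences plus their integer lengths, and an index vector incremented last-position-first with carry.
import Mathlib
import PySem

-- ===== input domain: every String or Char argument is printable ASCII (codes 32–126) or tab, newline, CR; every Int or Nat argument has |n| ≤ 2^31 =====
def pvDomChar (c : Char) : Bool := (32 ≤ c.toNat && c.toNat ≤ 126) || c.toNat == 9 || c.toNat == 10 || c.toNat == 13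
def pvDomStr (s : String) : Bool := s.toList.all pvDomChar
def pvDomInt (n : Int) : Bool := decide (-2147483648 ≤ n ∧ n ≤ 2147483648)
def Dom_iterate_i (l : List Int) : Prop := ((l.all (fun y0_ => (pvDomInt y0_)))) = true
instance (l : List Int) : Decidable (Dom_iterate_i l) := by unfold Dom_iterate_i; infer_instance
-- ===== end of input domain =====

-- B replaces A's nested recursive generators (one recursion level per dimension mutating a
-- shared state list) by an iterative odometer: precomputed per-dimension sequences and an
-- index vector incremented last-position-first with carry. Return-value equivalence only
-- (both Pythons return a generator; both enumerate the same tuples in the same order).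

-- ===== PORT A =====
-- inner generator iterate_i_k; 2 ** (l_k - 1) ported as 2 ^ (l_k - 1).toNat, exact for
-- l_k ≥ 1 (for l_k < 0 Python raises on a float range bound; excluded by Pre_).
def iterate_i_k (lk : Int) : List Int :=
  if lk == 0 then [0, 1]
  else (PySem.List.pyRange 1 (2 ^ (lk - 1).toNat + 1) 1).map (fun p => 2 * p - 1)

-- recursion(state, k); l[k] ported as getD (k is always in range since len(state) = len(l))
def iterateIRec (l : List Int) (state : List Int) (k : Nat) : List (List Int) :=
  if _h : state.length ≤ k then [state]
  else (iterate_i_k (l.getD k 0)).foldl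
        (fun acc ik => acc ++ iterateIRec l (state.set k ik) (k + 1)) []
termination_by state.length - k
decreasing_by simp only [List.length_set]; omega

-- state = [None]*len(l): placeholder 0, never reachable in any yielded tuple
def iterate_i (l : List Int) : List (List Int) :=
  iterateIRec l (List.replicate l.length 0) 0

-- ===== PORT B =====
-- per-dimension sequence: [0, 1] if lk == 0 else range(1, 2**lk, 2)
def seq_lk (lk : Int) : List Int :=
  if lk == 0 then [0, 1] else PySem.List.pyRange 1 (2 ^ lk.toNat) 2

-- the length of each dimension's sequence, kept as a plain integer (lens in Source B)
def lenOf (lk : Int) : Int := if lk == 0 then 2 else 2 ^ (lk - 1).toNat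

-- the inner carry loop (k from n-1 downwards), as structural recursion from the right:
-- positions whose digit is at its maximum are reset to 0 / seqs[k][0], the first position
-- (from the right) that can move is incremented; none = the odometer rolled over (return).
def stepO : List (List Int) → List Int → List Int → List Int → Option (List Int × List Int)
  | s :: ss, lv :: _ls, i :: is, c :: cs =>
    match stepO ss _ls is cs with
    | some (is', cs') => some (i :: is', c :: cs')
    | none =>
      if i + 1 = lv then none
      else some ((i + 1) :: ss.map (fun _ => (0 : Int)),
                 s.getD (i + 1).toNat 0 :: ss.map (fun t => t.getD 0 0))
  | _, _, _, _ => none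

-- the outer while-loop: yield cur, then step; the fuel argument only makes it total
-- (totalFuel seqs, the product of the sequence lengths, bounds the number of iterations)
def odoRun : Nat → List (List Int) → List Int → List Int → List Int → List (List Int)
  | 0, _, _, _, _ => []
  | fuel + 1, seqs, lens, idx, cur =>
    cur :: match stepO seqs lens idx cur with
           | none => []
           | some (idx', cur') => odoRun fuel seqs lens idx' cur'

def totalFuel : List (List Int) → Nat
  | [] => 1
  | s :: ss => s.length * totalFuel ss

def iterate_i_alt (l : List Int) : List (List Int) :=
  let seqs := l.map seq_lk
  odoRun (totalFuel seqs) seqs (l.map lenOf) (seqs.map (fun _ => (0 : Int)))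
    (seqs.map (fun s => s.getD 0 0))

-- ===== PRECONDITION & SPEC =====
-- Pre_ excludes negative entries: there Python A raises TypeError (range bound 2**(l_k-1)
-- is a float) as soon as the generator is consumed, and B raises likewise.
def Pre_iterate_i (l : List Int) : Prop := ∀ x ∈ l, 0 ≤ x
instance (l : List Int) : Decidable (Pre_iterate_i l) := by unfold Pre_iterate_i; infer_instance
def pvWitness_iterate_i : List Int := [2, 0, 1]

def Spec_iterate_i (l : List Int) (out : List (List Int)) : Prop := out = iterate_i_alt l
instance (l : List Int) (out : List (List Int)) : Decidable (Spec_iterate_i l out) := by unfold Spec_iterate_i; infer_instance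

-- ===== CLAIM (what is proved, stated in full; the proofs are below) =====
def Claim_equal_iterate_i : Prop := ∀ (l : List Int), Dom_iterate_i l → Pre_iterate_i l → Spec_iterate_i l (iterate_i l)

-- ===== LEMMAS AND PROOFS =====

-- the common reference value: the Cartesian product of the per-dimension sequences
def prodL (seqs : List (List Int)) : List (List Int) :=
  seqs.foldr (fun s prod => s.flatMap (fun x => prod.map (fun t => x :: t))) [[]]

-- ---- per-dimension sequences coincide on nonnegative entries ----
theorem seq_eq (lk : Int) (h : 0 ≤ lk) : iterate_i_k lk = seq_lk lk := by
  unfold iterate_i_k seq_lk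
  by_cases h0 : lk = 0
  · simp [h0]
  · have h1 : 1 ≤ lk := by omega
    simp only [beq_iff_eq, h0, if_false]
    rw [PySem.List.pyRange_one, PySem.List.pyRange_of_pos (a := 1) (b := 2 ^ lk.toNat) (s := 2) (by norm_num)]
    have he : lk.toNat = (lk - 1).toNat + 1 := by omega
    have hpow : (2 : Int) ^ lk.toNat = 2 * 2 ^ (lk - 1).toNat := by
      rw [he, pow_succ]; ring
    have h2 : (1 : Int) < 2 ^ lk.toNat := by
      rw [hpow]
      have : (1 : Int) ≤ 2 ^ (lk - 1).toNat := one_le_pow₀ (by norm_num)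
      omega
    rw [if_pos h2]
    have hcount : ((2 ^ lk.toNat - 1 + 2 - 1 : Int) / 2).toNat = ((2 ^ (lk - 1).toNat + 1 - 1 : Int)).toNat := by
      rw [hpow]
      have : (2 * 2 ^ (lk - 1).toNat - 1 + 2 - 1 : Int) / 2 = 2 ^ (lk - 1).toNat := by omega
      rw [this]; omega
    rw [hcount]
    simp only [List.map_map]
    apply List.map_congr_left
    intro k _
    simp; ring

theorem seq_lk_ne_nil (lk : Int) (h : 0 ≤ lk) : seq_lk lk ≠ [] := by
  unfold seq_lk
  by_cases h0 : lk = 0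
  · simp [h0]
  · have h1 : 1 ≤ lk := by omega
    simp only [beq_iff_eq, h0, if_false]
    rw [PySem.List.pyRange_of_pos (a := 1) (b := 2 ^ lk.toNat) (s := 2) (by norm_num)]
    have h2 : (1 : Int) < 2 ^ lk.toNat := by
      have : lk.toNat = (lk - 1).toNat + 1 := by omega
      rw [this, pow_succ]
      have : (1 : Int) ≤ 2 ^ (lk - 1).toNat := one_le_pow₀ (by norm_num)
      omega
    rw [if_pos h2]
    have : (0 : Int) < (2 ^ lk.toNat - 1 + 2 - 1) / 2 := by omega
    simp [List.range_eq_nil]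
    omega

-- ---- A's recursion produces the product (loop invariant) ----
theorem rec_eq (l : List Int) (hpre : ∀ x ∈ l, 0 ≤ x) :
    ∀ (n k : Nat) (state : List Int), state.length = l.length → l.length - k = n →
      iterateIRec l state k = (prodL ((l.drop k).map seq_lk)).map (fun t => state.take k ++ t) := by
  intro n
  induction n with
  | zero =>
    intro k state hlen hn
    have hk : l.length ≤ k := by omega
    rw [iterateIRec, dif_pos (by omega)]
    rw [List.drop_eq_nil_of_le hk]
    simp [prodL, List.take_of_length_le (by omega : state.length ≤ k)]
  | succ m ih =>
    intro k state hlen hn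
    have hk : k < l.length := by omega
    have hks : k < state.length := by omega
    rw [iterateIRec, dif_neg (by omega)]
    rw [PySem.List.foldl_append_eq_flatMap]
    rw [List.nil_append]
    have hget : l.getD k 0 = l[k] := List.getD_eq_getElem l 0 hk
    have hseq : iterate_i_k (l.getD k 0) = seq_lk l[k] := by
      rw [hget]; exact seq_eq _ (hpre _ (List.getElem_mem hk))
    rw [hseq]
    have hdrop : l.drop k = l[k] :: l.drop (k + 1) := List.drop_eq_getElem_cons hk
    rw [hdrop]
    simp only [List.map_cons, prodL, List.foldr_cons]
    rw [List.map_flatMap]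
    apply List.flatMap_congr
    intro ik _
    rw [ih (k + 1) (state.set k ik) (by simp [hlen]) (by omega)]
    have hset : (state.set k ik).take (k + 1) = state.take k ++ [ik] := by
      rw [List.set_eq_take_append_cons_drop, if_pos hks, List.take_append]
      rw [List.take_of_length_le (by simp)]
      have h1 : k + 1 - (state.take k).length = 1 := by simp [List.length_take]; omega
      rw [h1]
      simp
    rw [hset]
    simp only [List.map_map, prodL]
    apply List.map_congr_left
    intro t _
    simp

-- ---- B's odometer produces the product ----
-- the run relation: from state (idx, cur) the loop yields exactly the list R
inductive Runs (ss : List (List Int)) (ls : List Int) : List Int → List Int → List (List Int) → Prop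
  | last {is cs} : stepO ss ls is cs = none → Runs ss ls is cs [cs]
  | step {is cs is' cs' R} : stepO ss ls is cs = some (is', cs') → Runs ss ls is' cs' R →
      Runs ss ls is cs (cs :: R)

-- any sufficient fuel realizes a run
theorem odoRun_of_runs {ss : List (List Int)} {ls is cs : List Int} {R : List (List Int)}
    (h : Runs ss ls is cs R) : ∀ f : Nat, R.length ≤ f → odoRun f ss ls is cs = R := by
  induction h with
  | last hnone =>
    intro f hf
    match f, hf with
    | g + 1, _ => simp [odoRun, hnone]
  | step hsome _ ih =>
    intro f hf
    match f, hf with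
    | g + 1, hf =>
      simp only [odoRun, hsome]
      rw [ih g (by simpa using hf)]

-- lifting a suffix run under a fixed leading digit: the carry case (digit at its maximum)
theorem runs_lift_last {ss : List (List Int)} {ls is cs : List Int} {R : List (List Int)}
    (h : Runs ss ls is cs R) (s : List Int) (lv i x : Int) (hmax : i + 1 = lv) :
    Runs (s :: ss) (lv :: ls) (i :: is) (x :: cs) (R.map (fun t => x :: t)) := by
  induction h with
  | last hnone =>
    exact Runs.last (by simp [stepO, hnone, hmax])
  | step hsome _ ih =>
    exact Runs.step (by simp [stepO, hsome]) ih

-- the bump case (digit can still move: the run continues from the bumped state)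
theorem runs_lift_bump {ss : List (List Int)} {ls is cs : List Int} {R : List (List Int)}
    (h : Runs ss ls is cs R) (s : List Int) (lv i x : Int) (hlt : i + 1 ≠ lv)
    {R' : List (List Int)}
    (h' : Runs (s :: ss) (lv :: ls) ((i + 1) :: ss.map (fun _ => (0 : Int)))
            (s.getD (i + 1).toNat 0 :: ss.map (fun t => t.getD 0 0)) R') :
    Runs (s :: ss) (lv :: ls) (i :: is) (x :: cs) (R.map (fun t => x :: t) ++ R') := by
  induction h with
  | last hnone =>
    exact Runs.step (by simp [stepO, hnone, hlt]) h'
  | step hsome _ ih =>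
    exact Runs.step (by simp [stepO, hsome]) ih

-- the full sweep of one digit position, from position i to the end of s
theorem runs_sweep (ss : List (List Int)) (ls : List Int)
    (hss : Runs ss ls (ss.map (fun _ => (0 : Int)))
      (ss.map (fun t => t.getD 0 0)) (prodL ss)) (s : List Int) :
    ∀ (d i : Nat), s.length - i = d + 1 → i < s.length →
      Runs (s :: ss) ((s.length : Int) :: ls) ((i : Int) :: ss.map (fun _ => (0 : Int)))
        (s.getD i 0 :: ss.map (fun t => t.getD 0 0))
        ((s.drop i).flatMap (fun x => (prodL ss).map (fun t => x :: t))) := by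
  intro d
  induction d with
  | zero =>
    intro i hd hi
    have hlast : i + 1 = s.length := by omega
    have hdrop : s.drop i = [s.getD i 0] := by
      rw [List.getD_eq_getElem s 0 hi, List.drop_eq_getElem_cons hi,
        List.drop_eq_nil_of_le (by omega)]
    rw [hdrop]
    simp only [List.flatMap_cons, List.flatMap_nil, List.append_nil]
    exact runs_lift_last hss s _ _ _ (by omega)
  | succ d ih =>
    intro i hd hi
    have hlt : i + 1 < s.length := by omega
    have hdrop : s.drop i = s.getD i 0 :: s.drop (i + 1) := by
      rw [List.getD_eq_getElem s 0 hi]; exact List.drop_eq_getElem_cons hi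
    rw [hdrop]
    simp only [List.flatMap_cons]
    have hcast : ((i : Int) + 1) = ((i + 1 : Nat) : Int) := by push_cast; ring
    have h' := ih (i + 1) (by omega) hlt
    rw [← hcast] at h'
    have htn : ((i : Int) + 1).toNat = i + 1 := by omega
    rw [htn] at *
    exact runs_lift_bump hss s _ _ _ (by omega) h'

-- the odometer started at the all-zero index runs through the whole product
theorem runs_prodL : ∀ (ss : List (List Int)), (∀ s ∈ ss, s ≠ []) →
    Runs ss (ss.map (fun s => (s.length : Int))) (ss.map (fun _ => (0 : Int)))
      (ss.map (fun t => t.getD 0 0)) (prodL ss) := by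
  intro ss
  induction ss with
  | nil => intro _; exact Runs.last rfl
  | cons s ss ih =>
    intro hne
    have hs : s ≠ [] := hne s (by simp)
    have hlen : 0 < s.length := List.length_pos_iff.mpr hs
    have hss := ih (fun t ht => hne t (by simp [ht]))
    have h := runs_sweep ss (ss.map (fun s => (s.length : Int))) hss s (s.length - 1) 0 (by omega) hlen
    simp only [List.drop_zero] at h
    simpa [prodL] using h

theorem length_prodL : ∀ ss : List (List Int), (prodL ss).length = totalFuel ss := by
  intro ss
  induction ss with
  | nil => rfl
  | cons s ss ih =>
    simp only [prodL, List.foldr_cons, List.length_flatMap, totalFuel]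
    simp only [prodL] at ih
    have h1 : ∀ a ∈ s,
        ((List.foldr (fun s prod => List.flatMap (fun x => List.map (fun t => x :: t) prod) s)
            [[]] ss).map (fun t => a :: t)).length = totalFuel ss := by
      intro a _
      simp only [List.length_map]
      exact ih
    rw [List.map_congr_left h1, List.map_const', List.sum_replicate, smul_eq_mul]

-- under Pre_, the maintained integer lengths are the sequence lengths
theorem lenOf_eq (lk : Int) (h : 0 ≤ lk) : lenOf lk = ((seq_lk lk).length : Int) := by
  unfold lenOf seq_lk
  by_cases h0 : lk = 0
  · simp [h0]
  · have h1 : 1 ≤ lk := by omega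
    simp only [beq_iff_eq, h0, if_false]
    rw [PySem.List.pyRange_of_pos (a := 1) (b := 2 ^ lk.toNat) (s := 2) (by norm_num)]
    have he : lk.toNat = (lk - 1).toNat + 1 := by omega
    have hpow : (2 : Int) ^ lk.toNat = 2 * 2 ^ (lk - 1).toNat := by
      rw [he, pow_succ]; ring
    have hp1 : (1 : Int) ≤ 2 ^ (lk - 1).toNat := one_le_pow₀ (by norm_num)
    have h2 : (1 : Int) < 2 ^ lk.toNat := by rw [hpow]; omega
    rw [if_pos h2]
    simp only [List.length_map, List.length_range]
    have : (2 ^ lk.toNat - 1 + 2 - 1 : Int) / 2 = 2 ^ (lk - 1).toNat := by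
      rw [hpow]; omega
    rw [this]
    omega

theorem alt_eq_prodL (l : List Int) (hpre : ∀ x ∈ l, 0 ≤ x) :
    iterate_i_alt l = prodL (l.map seq_lk) := by
  unfold iterate_i_alt
  have hne : ∀ s ∈ l.map seq_lk, s ≠ [] := by
    intro s hs
    obtain ⟨lk, hlk, rfl⟩ := List.mem_map.mp hs
    exact seq_lk_ne_nil lk (hpre lk hlk)
  have hlens : l.map lenOf = (l.map seq_lk).map (fun s => (s.length : Int)) := by
    rw [List.map_map]
    exact List.map_congr_left (fun lk hlk => lenOf_eq lk (hpre lk hlk))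
  rw [hlens]
  exact odoRun_of_runs (runs_prodL _ hne) _ (by rw [length_prodL])

-- ===== VERDICT (by name: the statement is the Claim_ definition above) =====
theorem iterate_i_spec : Claim_equal_iterate_i := by
  intro l _ hpre
  unfold Spec_iterate_i iterate_i
  rw [alt_eq_prodL l hpre]
  rw [rec_eq l hpre l.length 0 (List.replicate l.length 0) (by simp) (by omega)]
  simp
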